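-- pv_equiv track=rewrite | github.com/tracewise-probing/tracewise_probing | curate_trace_dataset/construct_dataset/dt_human_label/utils/apps_metric/format_snoopy.py | paste_code_with_commented_trace
-- ===== SOURCE A (Python) =====
-- def paste_code_with_commented_trace( code_raw , trace_dict, **kwargs  ):
--     max_line  = max( list(trace_dict) )
--
--     trace_id = kwargs.get("trace_id", None )
--     code_list = code_raw.split("\n")
--
--     if max_line > len(code_list ):
--         return  None
--     assert max_line <= len(code_list ),  ( dict (code_len = len(code_list), max_line=max_line ,trace_dict=trace_dict, line_list= list(trace_dict) , trace_id=trace_id  ))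
--     for i  in range( len(code_list)  ) :
--
--         line_no = i+1
--         if line_no in trace_dict :
--             comments = trace_dict[  line_no ]
--             comments = "; ".join( comments )
--             code_list[ i  ] = code_list[ i  ]  +" #" +  comments
--
--     code_new_str = "\n".join( code_list )
--
--     return code_new_str
-- ===== SOURCE B (Python) =====
-- def paste_code_with_commented_trace(code_raw, trace_dict, **kwargs):
--     max_line = max(list(trace_dict))
--     code_list = code_raw.split("\n")
--     if max_line > len(code_list):
--         return None
--     ann = sorted(trace_dict.items(), key=lambda kv: kv[0])
--     out = []
--     j = 0
--     for line_no, line in enumerate(code_list, 1):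
--         while j < len(ann) and ann[j][0] < line_no:
--             j += 1
--         if j < len(ann) and ann[j][0] == line_no:
--             line = line + " #" + "; ".join(ann[j][1])
--             j += 1
--         out.append(line)
--     return "\n".join(out)
-- ===== Notes on version B (the rewrite author's own statement) =====
-- stated objective: alternative
-- what changed: B sorts the annotation items by line number once and then builds the output list front-to-back in a single two-pointer merge over (lines, sorted annotations), instead of scanning every line index and testing dict membership with an indexed in-place update.
import Mathlib
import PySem

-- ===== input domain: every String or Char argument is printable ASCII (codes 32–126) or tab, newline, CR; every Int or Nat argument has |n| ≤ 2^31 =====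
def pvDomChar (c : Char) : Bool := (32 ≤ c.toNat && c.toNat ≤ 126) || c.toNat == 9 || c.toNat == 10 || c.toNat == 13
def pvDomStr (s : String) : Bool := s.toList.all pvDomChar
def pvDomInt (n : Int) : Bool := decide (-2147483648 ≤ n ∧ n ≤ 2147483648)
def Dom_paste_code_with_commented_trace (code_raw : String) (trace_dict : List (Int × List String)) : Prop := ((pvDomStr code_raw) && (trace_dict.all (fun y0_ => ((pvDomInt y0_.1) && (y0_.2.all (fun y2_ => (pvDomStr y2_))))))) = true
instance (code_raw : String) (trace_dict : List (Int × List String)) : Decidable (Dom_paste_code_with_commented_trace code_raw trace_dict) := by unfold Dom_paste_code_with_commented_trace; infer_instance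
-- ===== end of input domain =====

-- B sorts the annotations by line number and builds the output in one front-to-back merge
-- pass, instead of scanning every line index with a dict-membership test (objective: alternative).

-- ===== PORT A =====
-- A's loop body: at index i, if line i+1 is traced, append the joined comments to that line
def pvStepA (d : PySem.Dict Int (List String)) (cl : List String) (i : Nat) : List String :=
  if d.contains ((i : Int) + 1) then
    match d.get? ((i : Int) + 1) with
    | some comments => cl.set i (cl.getD i "" ++ " #" ++ PySem.Str.join "; " comments)
    | none => cl   -- unreachable: guarded by `contains`
  else cl

def paste_code_with_commented_trace (code_raw : String) (trace_dict : List (Int × List String)) : Option String :=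
  let d := PySem.Dict.ofList trace_dict
  match PySem.List.max? d.keys (fun k => k) with
  | none => none  -- max() of an empty dict raises ValueError; excluded by Pre_
  | some max_line =>
    -- sep is the nonempty literal "\n", so split? is always `some`; the default is unreachable
    let code_list := (PySem.Str.split? code_raw "\n").getD []
    if max_line > (code_list.length : Int) then none
    else
      some (PySem.Str.join "\n" ((List.range code_list.length).foldl (pvStepA d) code_list))

-- ===== PORT B =====
-- B's inner while loop: advance the annotation pointer past keys below the current line number
-- (the Python index j into ann is represented by the remaining suffix of ann)
def pvSkip (m : Int) : List (Int × List String) → List (Int × List String)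
  | [] => []
  | p :: tl => if p.1 < m then pvSkip m tl else p :: tl

-- B's for loop over enumerate(code_list, 1): merge the sorted annotations into the lines
def pvMerge (m : Int) (ann : List (Int × List String)) : List String → List String
  | [] => []
  | line :: rest =>
    match pvSkip m ann with
    | [] => line :: pvMerge (m + 1) [] rest
    | p :: tl =>
      if p.1 = m then (line ++ " #" ++ PySem.Str.join "; " p.2) :: pvMerge (m + 1) tl rest
      else line :: pvMerge (m + 1) (p :: tl) rest

def paste_code_with_commented_trace_alt (code_raw : String) (trace_dict : List (Int × List String)) : Option String :=
  let d := PySem.Dict.ofList trace_dict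
  match PySem.List.max? d.keys (fun k => k) with
  | none => none  -- max() of an empty dict raises ValueError; excluded by Pre_
  | some max_line =>
    -- sep is the nonempty literal "\n", so split? is always `some`; the default is unreachable
    let code_list := (PySem.Str.split? code_raw "\n").getD []
    if max_line > (code_list.length : Int) then none
    else
      let ann := PySem.List.sorted d.items (fun kv => kv.1) false
      some (PySem.Str.join "\n" (pvMerge 1 ann code_list))

-- ===== PRECONDITION & SPEC =====
-- Pre_ excludes only the empty dict, on which A's max() raises ValueError (B raises there too).
def Pre_paste_code_with_commented_trace (code_raw : String) (trace_dict : List (Int × List String)) : Prop := trace_dict ≠ []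
instance (code_raw : String) (trace_dict : List (Int × List String)) : Decidable (Pre_paste_code_with_commented_trace code_raw trace_dict) := by unfold Pre_paste_code_with_commented_trace; infer_instance
def pvWitness_paste_code_with_commented_trace : String × (List (Int × List String)) := ("a\nb", [(1, ["x", "y"]), (2, ["z"])])

def Spec_paste_code_with_commented_trace (code_raw : String) (trace_dict : List (Int × List String)) (out : Option String) : Prop := out = paste_code_with_commented_trace_alt code_raw trace_dict
instance (code_raw : String) (trace_dict : List (Int × List String)) (out : Option String) : Decidable (Spec_paste_code_with_commented_trace code_raw trace_dict out) := by unfold Spec_paste_code_with_commented_trace; infer_instance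

-- ===== CLAIM (what is proved, stated in full; the proofs are below) =====
def Claim_equal_paste_code_with_commented_trace : Prop := ∀ (code_raw : String) (trace_dict : List (Int × List String)), Dom_paste_code_with_commented_trace code_raw trace_dict → Pre_paste_code_with_commented_trace code_raw trace_dict → Spec_paste_code_with_commented_trace code_raw trace_dict (paste_code_with_commented_trace code_raw trace_dict)

-- ===== LEMMAS AND PROOFS =====

-- the common transformation of one line given an optional comment list
def pvApp (o : Option (List String)) (s : String) : String :=
  match o with
  | some cs => s ++ " #" ++ PySem.Str.join "; " cs
  | none => s

theorem pvStepA_length (d : PySem.Dict Int (List String)) (cl : List String) (i : Nat) :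
    (pvStepA d cl i).length = cl.length := by
  unfold pvStepA; split <;> [skip; rfl]
  split <;> simp

theorem pvFoldA_length (d : PySem.Dict Int (List String)) (m : Nat) (cl : List String) :
    ((List.range m).foldl (pvStepA d) cl).length = cl.length := by
  induction m generalizing cl with
  | zero => rfl
  | succ m ih => simp [List.range_succ, List.foldl_append, pvStepA_length, ih]

-- A's fold over `range m` does not touch indices ≥ m
theorem pvFoldA_get_untouched (d : PySem.Dict Int (List String)) (m : Nat) (cl : List String)
    (i : Nat) (hmi : m ≤ i) :
    ((List.range m).foldl (pvStepA d) cl)[i]? = cl[i]? := by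
  induction m with
  | zero => rfl
  | succ m ih =>
    rw [List.range_succ, List.foldl_append, List.foldl_cons, List.foldl_nil]
    have h1 : (pvStepA d ((List.range m).foldl (pvStepA d) cl) m)[i]?
        = ((List.range m).foldl (pvStepA d) cl)[i]? := by
      unfold pvStepA
      split
      · split
        · exact List.getElem?_set_ne (by omega)
        · rfl
      · rfl
    rw [h1, ih (by omega)]

-- one step of A at its own index / at another index
theorem pvStepA_get_self (d : PySem.Dict Int (List String)) (cl : List String) (i : Nat)
    (hi : i < cl.length) :
    (pvStepA d cl i)[i]? = some (pvApp (d.get? ((i : Int) + 1)) (cl.getD i "")) := by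
  unfold pvStepA
  split
  · rename_i hcont
    cases hget : d.get? ((i : Int) + 1) with
    | none =>
      exfalso
      rw [PySem.Dict.get?_eq_none_iff_contains] at hget
      simp [hget] at hcont
    | some cs =>
      simp [pvApp, List.getElem?_set_self', List.getElem?_eq_getElem hi,
        List.getD_eq_getElem?_getD]
  · rename_i hcont
    have hg : d.get? ((i : Int) + 1) = none := by
      rw [PySem.Dict.get?_eq_none_iff_contains]
      simpa using hcont
    simp [hg, pvApp, List.getElem?_eq_getElem hi, List.getD_eq_getElem?_getD]

theorem pvStepA_get_ne (d : PySem.Dict Int (List String)) (cl : List String) (i j : Nat)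
    (hne : j ≠ i) : (pvStepA d cl j)[i]? = cl[i]? := by
  unfold pvStepA
  split
  · split
    · exact List.getElem?_set_ne hne
    · rfl
  · rfl

-- pointwise value of A's fold over `range m`
theorem pvFoldA_get (d : PySem.Dict Int (List String)) (m : Nat) (cl : List String) (i : Nat)
    (hi : i < cl.length) (hm : m ≤ cl.length) :
    ((List.range m).foldl (pvStepA d) cl)[i]? =
      some (if i < m then pvApp (d.get? ((i : Int) + 1)) (cl.getD i "") else cl.getD i "") := by
  induction m with
  | zero => simp [List.getD_eq_getElem?_getD, List.getElem?_eq_getElem hi]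
  | succ m ih =>
    have hm' : m ≤ cl.length := by omega
    have hlen : ((List.range m).foldl (pvStepA d) cl).length = cl.length := pvFoldA_length d m cl
    have hself : ((List.range m).foldl (pvStepA d) cl)[m]? = cl[m]? :=
      pvFoldA_get_untouched d m cl m le_rfl
    rw [List.range_succ, List.foldl_append, List.foldl_cons, List.foldl_nil]
    by_cases him : i = m
    · subst him
      rw [pvStepA_get_self d _ i (by omega)]
      have : ((List.range i).foldl (pvStepA d) cl).getD i "" = cl.getD i "" := by
        simp [List.getD_eq_getElem?_getD, hself]
      rw [this]
      simp
    · rw [pvStepA_get_ne d _ i m (by omega), ih hm']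
      have h : i < m ↔ i < m + 1 := by omega
      simp [h]

-- B-side: pvSkip facts
theorem pvSkip_find? (m q : Int) (ann : List (Int × List String)) (h : m ≤ q) :
    ann.find? (fun p => p.1 == q) = (pvSkip m ann).find? (fun p => p.1 == q) := by
  induction ann with
  | nil => rfl
  | cons p tl ih =>
    unfold pvSkip
    split
    · rename_i hlt
      rw [List.find?_cons_of_neg (by simp; omega)]
      exact ih
    · rfl

theorem pvSkip_head_ge (m : Int) (ann : List (Int × List String)) (p : Int × List String)
    (tl : List (Int × List String)) (h : pvSkip m ann = p :: tl) : m ≤ p.1 := by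
  induction ann with
  | nil => simp [pvSkip] at h
  | cons q tl' ih =>
    unfold pvSkip at h
    split at h
    · exact ih h
    · rename_i hge
      cases h
      omega

theorem pvSkip_pairwise (m : Int) (ann : List (Int × List String))
    (h : ann.Pairwise (fun a b => a.1 < b.1)) :
    (pvSkip m ann).Pairwise (fun a b => a.1 < b.1) := by
  induction ann with
  | nil => exact h
  | cons p tl ih =>
    unfold pvSkip
    rw [List.pairwise_cons] at h
    split
    · exact ih h.2
    · exact List.pairwise_cons.mpr h

theorem pvMerge_length (lines : List String) : ∀ (m : Int) (ann : List (Int × List String)),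
    (pvMerge m ann lines).length = lines.length := by
  induction lines with
  | nil => intro m ann; rfl
  | cons line rest ih =>
    intro m ann
    cases hsk : pvSkip m ann with
    | nil => simp [pvMerge, hsk, ih]
    | cons p tl =>
      simp only [pvMerge, hsk]
      split <;> simp [ih]

-- pointwise value of B's merge: index i picks up the comments filed under key m + i
theorem pvMerge_get (lines : List String) : ∀ (m : Int) (ann : List (Int × List String)) (i : Nat),
    ann.Pairwise (fun a b => a.1 < b.1) → i < lines.length →
    (pvMerge m ann lines)[i]? =
      some (pvApp ((ann.find? (fun p => p.1 == m + (i : Int))).map Prod.snd) (lines.getD i "")) := by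
  induction lines with
  | nil => intro m ann i _ hi; simp at hi
  | cons line rest ih =>
    intro m ann i hpw hi
    have hpw' := pvSkip_pairwise m ann hpw
    cases hsk : pvSkip m ann with
    | nil =>
      have hnone : ∀ q : Int, m ≤ q → ann.find? (fun p => p.1 == q) = none := by
        intro q hq; rw [pvSkip_find? m q ann hq, hsk]; rfl
      cases i with
      | zero =>
        simp only [pvMerge, hsk, List.getElem?_cons_zero, List.getD_cons_zero,
          Nat.cast_zero, add_zero]
        rw [hnone m le_rfl]
        simp [pvApp]
      | succ j =>
        simp only [pvMerge, hsk, List.getElem?_cons_succ, List.getD_cons_succ,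
          Nat.cast_add, Nat.cast_one]
        rw [ih (m + 1) [] j (by simp) (by simpa using hi)]
        rw [hnone (m + ((j : Int) + 1)) (by omega)]
        simp [pvApp]
    | cons p tl =>
      have hfsk : ∀ q : Int, m ≤ q →
          ann.find? (fun x => x.1 == q) = (p :: tl).find? (fun x => x.1 == q) := by
        intro q hq; rw [pvSkip_find? m q ann hq, hsk]
      have hk : m ≤ p.1 := pvSkip_head_ge m ann p tl hsk
      rw [hsk, List.pairwise_cons] at hpw'
      by_cases hkm : p.1 = m
      · cases i with
        | zero =>
          simp only [pvMerge, hsk, if_pos hkm, List.getElem?_cons_zero, List.getD_cons_zero,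
            Nat.cast_zero, add_zero]
          rw [hfsk m le_rfl, List.find?_cons_of_pos (by simp [hkm])]
          simp [pvApp]
        | succ j =>
          simp only [pvMerge, hsk, if_pos hkm, List.getElem?_cons_succ, List.getD_cons_succ,
            Nat.cast_add, Nat.cast_one]
          rw [ih (m + 1) tl j hpw'.2 (by simpa using hi)]
          rw [hfsk (m + ((j : Int) + 1)) (by omega),
            List.find?_cons_of_neg (by simp [hkm]; omega)]
          have harith : m + ((j : Int) + 1) = (m + 1) + (j : Int) := by ring
          simp only [harith]
      · have hkgt : m < p.1 := by omega
        cases i with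
        | zero =>
          simp only [pvMerge, hsk, if_neg hkm, List.getElem?_cons_zero, List.getD_cons_zero,
            Nat.cast_zero, add_zero]
          have hfnone : ann.find? (fun x => x.1 == m) = none := by
            rw [hfsk m le_rfl]
            apply List.find?_eq_none.mpr
            intro x hx
            rcases List.mem_cons.mp hx with h | h
            · subst h; simp; omega
            · have := hpw'.1 x h
              simp
              omega
          rw [hfnone]
          simp [pvApp]
        | succ j =>
          simp only [pvMerge, hsk, if_neg hkm, List.getElem?_cons_succ, List.getD_cons_succ,
            Nat.cast_add, Nat.cast_one]
          rw [ih (m + 1) (p :: tl) j (List.pairwise_cons.mpr hpw') (by simpa using hi)]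
          rw [hfsk (m + ((j : Int) + 1)) (by omega)]
          have harith : m + ((j : Int) + 1) = (m + 1) + (j : Int) := by ring
          simp only [harith]

-- find? in the sorted items list is the dict lookup
theorem pvFind_sorted_eq_get? (d : PySem.Dict Int (List String)) (hnod : d.keys.Nodup) (k : Int) :
    (((PySem.List.sorted d.items (fun kv => kv.1) false).find? (fun p => p.1 == k)).map Prod.snd)
      = d.get? k := by
  have hperm : (PySem.List.sorted d.items (fun kv => kv.1) false).Perm d.items :=
    PySem.List.sorted_perm d.items (fun kv => kv.1) false
  cases hg : d.get? k with
  | none =>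
    have hk : k ∉ d.keys := by
      rwa [PySem.Dict.get?_eq_none_iff_not_mem_keys] at hg
    have : (PySem.List.sorted d.items (fun kv => kv.1) false).find? (fun p => p.1 == k) = none := by
      apply List.find?_eq_none.mpr
      rintro ⟨a, b⟩ hab hbeq
      have ha : a = k := by simpa using hbeq
      subst ha
      exact hk (PySem.Dict.mem_keys_of_mem_items d (hperm.mem_iff.mp hab))
    simp [this]
  | some v =>
    have hmem : (k, v) ∈ d.items := PySem.Dict.mem_items_of_get?_eq_some d hg
    have hmem' : (k, v) ∈ PySem.List.sorted d.items (fun kv => kv.1) false :=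
      hperm.mem_iff.mpr hmem
    cases hf : (PySem.List.sorted d.items (fun kv => kv.1) false).find? (fun p => p.1 == k) with
    | none =>
      exfalso
      have := List.find?_eq_none.mp hf _ hmem'
      simp at this
    | some x =>
      have hx1 : x.1 = k := by simpa using List.find?_some hf
      have hxmem : x ∈ d.items := hperm.mem_iff.mp (List.mem_of_find?_eq_some hf)
      have hnodmap : (d.items.map Prod.fst).Nodup := by
        simpa [PySem.Dict.keys] using hnod
      have hxeq : x = (k, v) :=
        List.inj_on_of_nodup_map hnodmap hxmem hmem (by simp [hx1])
      simp [hxeq]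

-- the sorted items list has strictly increasing keys
theorem pvSorted_pairwise_lt (d : PySem.Dict Int (List String)) (hnod : d.keys.Nodup) :
    (PySem.List.sorted d.items (fun kv => kv.1) false).Pairwise (fun a b => a.1 < b.1) := by
  have hle : (PySem.List.sorted d.items (fun kv => kv.1) false).Pairwise
      (fun a b => a.1 ≤ b.1) := PySem.List.sorted_pairwise d.items (fun kv => kv.1)
  have hperm : (PySem.List.sorted d.items (fun kv => kv.1) false).Perm d.items :=
    PySem.List.sorted_perm d.items (fun kv => kv.1) false
  have hnoditems : (d.items.map Prod.fst).Nodup := by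
    simpa [PySem.Dict.keys] using hnod
  have hnod' : ((PySem.List.sorted d.items (fun kv => kv.1) false).map Prod.fst).Nodup :=
    (hperm.map Prod.fst).nodup_iff.mpr hnoditems
  have hne : (PySem.List.sorted d.items (fun kv => kv.1) false).Pairwise
      (fun a b => a.1 ≠ b.1) := by
    simpa [List.Nodup, List.pairwise_map] using hnod'
  exact (hle.and hne).imp (fun h => lt_of_le_of_ne h.1 h.2)

-- the two algorithms produce the same list of lines
theorem pvLoops_eq (trace_dict : List (Int × List String)) (cl : List String) :
    (List.range cl.length).foldl (pvStepA (PySem.Dict.ofList trace_dict)) cl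
      = pvMerge 1 (PySem.List.sorted (PySem.Dict.ofList trace_dict).items
          (fun kv => kv.1) false) cl := by
  have hnod : (PySem.Dict.ofList trace_dict).keys.Nodup :=
    PySem.Dict.nodup_keys_ofList trace_dict
  apply List.ext_getElem?
  intro i
  by_cases hi : i < cl.length
  · rw [pvFoldA_get _ _ _ _ hi le_rfl,
      pvMerge_get cl 1 _ i (pvSorted_pairwise_lt _ hnod) hi]
    have hq : (1 : Int) + (i : Int) = (i : Int) + 1 := by ring
    rw [hq, pvFind_sorted_eq_get?]
    · simp [hi]
    · exact hnod
  · have h1 := pvFoldA_length (PySem.Dict.ofList trace_dict) cl.length cl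
    have h2 := pvMerge_length cl 1 (PySem.List.sorted (PySem.Dict.ofList trace_dict).items
      (fun kv => kv.1) false)
    rw [List.getElem?_eq_none (by omega), List.getElem?_eq_none (by omega)]

-- ===== VERDICT (by name: the statement is the Claim_ definition above) =====
theorem paste_code_with_commented_trace_spec : Claim_equal_paste_code_with_commented_trace := by
  intro code_raw trace_dict _ _
  unfold Spec_paste_code_with_commented_trace
  simp only [paste_code_with_commented_trace, paste_code_with_commented_trace_alt]
  cases hmax : PySem.List.max? (PySem.Dict.ofList trace_dict).keys (fun k => k) with
  | none => rfl
  | some max_line =>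
    simp only
    split
    · rfl
    · rw [pvLoops_eq]
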